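-- pv_equiv track=rewrite | github.com/AlexeSimon/adventofcode | 2018/5/code.py | resolve
-- ===== SOURCE A (Python) =====
-- def resolve(polymer):
--     i = 0
--     while i < len(polymer)-1:
--         if polymer[i] != polymer[i+1] and polymer[i].upper() == polymer[i+1].upper():
--             del polymer[i+1]
--             del polymer[i]
--             i = -1
--         i += 1
--     return polymer
-- ===== SOURCE B (Python) =====
-- def resolve(polymer):
--     stack = []
--     for unit in polymer:
--         if stack and stack[-1] != unit and stack[-1].upper() == unit.upper():
--             stack.pop()
--         else:
--             stack.append(unit)
--     return stack
-- ===== Notes on version B (the rewrite author's own statement) =====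
-- stated objective: faster
-- what changed: Replaced A's delete-first-reacting-pair-and-restart-from-index-0 loop with a single left-to-right pass maintaining a stack (push a unit, pop when it reacts with the stack top), removing the repeated rescans of the already-checked prefix.
import Mathlib
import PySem

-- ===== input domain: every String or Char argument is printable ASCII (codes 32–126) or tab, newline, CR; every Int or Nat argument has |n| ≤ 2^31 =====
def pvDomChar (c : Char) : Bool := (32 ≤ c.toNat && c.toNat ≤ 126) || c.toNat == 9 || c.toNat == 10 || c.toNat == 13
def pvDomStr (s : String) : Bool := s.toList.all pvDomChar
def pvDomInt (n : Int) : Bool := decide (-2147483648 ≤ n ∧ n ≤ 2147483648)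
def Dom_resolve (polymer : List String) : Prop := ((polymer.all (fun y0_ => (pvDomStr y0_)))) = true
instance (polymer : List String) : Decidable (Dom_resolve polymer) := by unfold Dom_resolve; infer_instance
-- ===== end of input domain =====

-- B replaces A's delete-first-pair-and-restart scan by a one-pass stack reduction (same return
-- value; note Python A mutates its argument in place and returns it, B builds a fresh list —
-- the claim proved here is about the return value).

-- ===== PORT A =====
-- the reaction test 'polymer[i] != polymer[i+1] and polymer[i].upper() == polymer[i+1].upper()'
def reacts (x y : String) : Bool := x != y && (PySem.Str.upper x == PySem.Str.upper y)

-- A's while loop: counter i, test pair (i,i+1); on a reaction delete both elements and restart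
-- at 0 ('i = -1' then 'i += 1').  i is never negative at the loop head, so it is carried as a
-- Nat; the guard i+1 < length puts both index accesses in range, so getD "" is exact there.
def resolveGo (polymer : List String) (i : Nat) : List String :=
  if _h : i + 1 < polymer.length then
    if reacts (polymer.getD i "") (polymer.getD (i+1) "") then
      resolveGo ((polymer.eraseIdx (i+1)).eraseIdx i) 0
    else
      resolveGo polymer (i+1)
  else
    polymer
termination_by (polymer.length, polymer.length - i)
decreasing_by
  · apply Prod.Lex.left
    have h1 : (polymer.eraseIdx (i+1)).length = polymer.length - 1 := by
      rw [List.length_eraseIdx, if_pos _h]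
    have h2 : ((polymer.eraseIdx (i+1)).eraseIdx i).length = polymer.length - 2 := by
      rw [List.length_eraseIdx, if_pos (by omega)]; omega
    omega
  · apply Prod.Lex.right
    omega

def resolve (polymer : List String) : List String := resolveGo polymer 0

-- ===== PORT B =====
-- B's for loop over the units; the stack is carried head-first (list head = stack top).
def resolveScan (stack : List String) : List String → List String
  | [] => stack.reverse
  | unit :: rest =>
    match stack with
    | top :: stack' =>
      if reacts top unit then resolveScan stack' rest
      else resolveScan (unit :: top :: stack') rest
    | [] => resolveScan [unit] rest

def resolve_alt (polymer : List String) : List String := resolveScan [] polymer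

-- ===== PRECONDITION & SPEC =====
def Spec_resolve (polymer : List String) (out : List String) : Prop := out = resolve_alt polymer
instance (polymer : List String) (out : List String) : Decidable (Spec_resolve polymer out) := by unfold Spec_resolve; infer_instance

-- ===== CLAIM (what is proved, stated in full; the proofs are below) =====
def Claim_equal_resolve : Prop := ∀ (polymer : List String), Dom_resolve polymer → Spec_resolve polymer (resolve polymer)

-- ===== LEMMAS AND PROOFS =====

-- Scanning a reaction-free block just pushes it onto the stack (no pops happen).
lemma scan_flush : ∀ (a stack r : List String),
    List.IsChain (fun x y => reacts x y = false) a →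
    (∀ t h, stack.head? = some t → a.head? = some h → reacts t h = false) →
    resolveScan stack (a ++ r) = resolveScan (a.reverse ++ stack) r := by
  intro a
  induction a with
  | nil => intro stack r _ _; simp
  | cons h tail ih =>
    intro stack r hch hhd
    have hch' : List.IsChain (fun x y => reacts x y = false) tail := hch.tail
    have htailhd : ∀ t h', (h :: tail).head? = some t → tail.head? = some h' →
        reacts t h' = false := by
      intro t h' ht hh'
      simp at ht; subst ht
      exact hch.rel_head? hh'
    cases stack with
    | nil =>
      simp only [List.cons_append, resolveScan]
      rw [ih [h] r hch' (by intro t h' ht hh'; simp at ht; subst ht; exact hch.rel_head? hh')]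
      simp
    | cons top stack' =>
      have hf : reacts top h = false := hhd top h rfl rfl
      simp only [List.cons_append, resolveScan, hf]
      rw [ih (h :: top :: stack') r hch'
        (by intro t h' ht hh'; simp at ht; subst ht; exact hch.rel_head? hh')]
      simp

-- stack-top view of the reversed (i+1)-prefix
lemma take_succ_reverse (p : List String) (i : Nat) (hi : i < p.length) :
    (p.take (i+1)).reverse = p[i] :: (p.take i).reverse := by
  rw [List.take_add_one]
  simp [List.getElem?_eq_getElem hi]

-- restarting the scan on the first element is the same as scanning from scratch
lemma scan_first (q : List String) :
    resolveScan ((q.take 1).reverse) (q.drop 1) = resolveScan [] q := by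
  cases q with
  | nil => simp
  | cons h t => simp [resolveScan]

-- Main invariant: when all adjacent pairs inside the first i+1 elements are non-reacting
-- (exactly what A has already checked when its counter reaches i), A's loop from counter i
-- equals B's scan with that prefix on the stack.
lemma go_eq_scan : ∀ (p : List String) (i : Nat),
    List.IsChain (fun x y => reacts x y = false) (p.take (i+1)) →
    resolveGo p i = resolveScan ((p.take (i+1)).reverse) (p.drop (i+1)) := by
  intro p i
  fun_induction resolveGo p i with
  | case1 p i hlen hre ih =>
    intro hch
    have hi : i < p.length := by omega
    set p' := (p.eraseIdx (i+1)).eraseIdx i with hp'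
    have hch0 : List.IsChain (fun x y => reacts x y = false) (p'.take 1) := by
      cases h1 : p'.take 1 with
      | nil => exact List.isChain_nil
      | cons a t =>
        have hlen1 := congrArg List.length h1
        simp at hlen1
        cases t with
        | nil => exact List.isChain_singleton a
        | cons b u => simp at hlen1; omega
    rw [ih hch0, scan_first]
    -- p' = p.take i ++ p.drop (i+2)
    have hsplit : p' = p.take i ++ p.drop (i+2) := by
      rw [hp', List.eraseIdx_eq_take_drop_succ, List.eraseIdx_eq_take_drop_succ]
      have hti : (p.take (i+1)).take i = p.take i := by
        rw [List.take_take]; congr 1; omega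
      rw [List.take_append_of_le_length (by simp; omega), hti,
          List.drop_append_of_le_length (by simp; omega)]
      congr 1
      rw [List.drop_take]
      have : (p.take (i+1+1)).drop (i+1) ++ p.drop (i+1+1) = p.drop (i+1) := by
        rw [← List.drop_append_of_le_length (by simp; omega)]
        congr 1
        exact List.take_append_drop _ p
      simpa using this
    have hchi : List.IsChain (fun x y => reacts x y = false) (p.take i) := by
      have := hch.take i
      rwa [List.take_take, min_eq_left (by omega)] at this
    rw [hsplit,
        scan_flush (p.take i) [] (p.drop (i+2)) hchi (by intro t h ht _; simp at ht)]
    -- now take one scan step backwards on the RHS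
    rw [take_succ_reverse p i hi, List.drop_eq_getElem_cons hlen]
    have hre' : reacts p[i] p[i+1] = true := by
      rwa [List.getD_eq_getElem _ _ hi, List.getD_eq_getElem _ _ hlen] at hre
    simp [resolveScan, hre']
  | case2 p i hlen hre ih =>
    intro hch
    have hi : i < p.length := by omega
    have hre' : reacts p[i] p[i+1] = false := by
      rw [List.getD_eq_getElem _ _ hi, List.getD_eq_getElem _ _ hlen] at hre
      simpa using hre
    have hch' : List.IsChain (fun x y => reacts x y = false) (p.take (i+2)) := by
      rw [List.isChain_iff_getElem] at hch ⊢
      intro j hj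
      simp only [List.length_take] at hj
      have hj2 : j + 1 < p.length := by omega
      simp only [List.getElem_take]
      by_cases hcase : j = i
      · subst hcase; exact hre'
      · have : j + 1 < (p.take (i+1)).length := by simp; omega
        have := hch j this
        simpa [List.getElem_take] using this
    rw [ih hch']
    rw [take_succ_reverse p i hi, List.drop_eq_getElem_cons hlen,
        take_succ_reverse p (i+1) hlen]
    simp [resolveScan, hre', take_succ_reverse p i hi]
  | case3 p i hlen =>
    intro _
    have hd : p.drop (i+1) = [] := List.drop_eq_nil_of_le (by omega)
    rw [hd]
    simp only [resolveScan, List.reverse_reverse]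
    rw [List.take_of_length_le (by omega)]

-- ===== VERDICT (by name: the statement is the Claim_ definition above) =====
theorem resolve_spec : Claim_equal_resolve := by
  intro p _
  unfold Spec_resolve resolve resolve_alt
  have hch : List.IsChain (fun x y => reacts x y = false) (p.take 1) := by
    cases p with
    | nil => exact List.isChain_nil
    | cons h t =>
      show List.IsChain _ [h]
      exact List.isChain_singleton h
  rw [go_eq_scan p 0 hch]
  exact scan_first p
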